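-- pv_equiv track=rewrite | github.com/PlayzAhmed/A2SV | 22-Jul-2025/Minimum Moves to Reach Target Score 378706.py | minMoves
-- ===== SOURCE A (Python) =====
-- def minMoves(target, maxDoubles):
--     moves = 0
--     while target > 1 and maxDoubles:
--         if target % 2 == 0:
--             target //= 2
--             maxDoubles -= 1
--         else:
--             target -= 1
--
--         moves += 1
--
--     return moves + target - 1
-- ===== SOURCE B (Python) =====
-- def minMoves(target, maxDoubles):
--     if target <= 1:
--         return target - 1
--     k = min(maxDoubles, target.bit_length() - 1)
--     low = target & ((1 << k) - 1)
--     return k + low.bit_count() + (target >> k) - 1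
-- ===== Notes on version B (the rewrite author's own statement) =====
-- stated objective: alternative
-- what changed: Replaces A's simulation loop (repeated decrement/halve) with a closed-form bit computation: k = min(maxDoubles, bit_length-1) halvings, popcount of the low k bits counts the decrements, and the remaining high part target>>k is finished by decrements.
-- outside the precondition, e.g. on minMoves(8, -1): A returns 3, B raises ValueError
import Mathlib
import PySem

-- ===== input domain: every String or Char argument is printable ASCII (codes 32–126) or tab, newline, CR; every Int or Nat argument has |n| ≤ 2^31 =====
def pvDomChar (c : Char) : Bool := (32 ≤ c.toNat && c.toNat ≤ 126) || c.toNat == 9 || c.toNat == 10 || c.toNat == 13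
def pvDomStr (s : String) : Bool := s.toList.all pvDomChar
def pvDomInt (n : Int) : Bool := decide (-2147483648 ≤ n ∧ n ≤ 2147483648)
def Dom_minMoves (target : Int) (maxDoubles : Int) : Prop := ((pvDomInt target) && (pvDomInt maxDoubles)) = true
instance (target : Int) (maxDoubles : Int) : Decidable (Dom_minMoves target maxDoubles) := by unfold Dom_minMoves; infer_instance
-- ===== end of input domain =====

-- B replaces A's decrement/halve simulation loop by a closed-form bit computation (same cost class, no speed claim).

-- ===== PORT A =====
-- the while-loop: state (target, maxDoubles, moves); 'and maxDoubles' is integer truthiness, i.e. maxDoubles ≠ 0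
def minMovesLoop (target : Int) (maxDoubles : Int) (moves : Int) : Int :=
  if 1 < target ∧ maxDoubles ≠ 0 then
    if PySem.Int.mod target 2 = 0 then
      minMovesLoop (PySem.Int.floordiv target 2) (maxDoubles - 1) (moves + 1)
    else
      minMovesLoop (target - 1) maxDoubles (moves + 1)
  else
    moves + target - 1
termination_by target.toNat
decreasing_by
  · have := PySem.Int.floordiv_eq_ediv_of_pos (a := target) (b := 2) (by omega)
    rw [this]; omega
  · omega

def minMoves (target : Int) (maxDoubles : Int) : Int :=
  minMovesLoop target maxDoubles 0

-- ===== PORT B =====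
-- 'target.bit_length()' / 'low.bit_count()' → PySem.Int.bitLength / bitCount (exact);
-- '1 << k' / 'target >> k' → '1 <<< k.toNat' / 'target >>> k.toNat' (exact for k ≥ 0; a negative k
-- raises ValueError in Python, and Pre_ gives k ≥ 0)
def minMoves_alt (target : Int) (maxDoubles : Int) : Int :=
  if target ≤ 1 then target - 1
  else
    let k : Int := min maxDoubles ((PySem.Int.bitLength target : Int) - 1)
    let low : Int := PySem.Int.band target ((1 <<< k.toNat) - 1)
    k + (PySem.Int.bitCount low : Int) + (target >>> k.toNat) - 1

-- ===== PRECONDITION & SPEC =====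
-- Pre_ excludes a negative doubling count combined with target > 1 (outside the task's natural
-- domain of nonnegative counts): there A's truthiness test never turns false, so A keeps halving as
-- if doublings were unlimited, while B's shift by the negative amount raises ValueError.
def Pre_minMoves (target : Int) (maxDoubles : Int) : Prop := 0 ≤ maxDoubles ∨ target ≤ 1
instance (target : Int) (maxDoubles : Int) : Decidable (Pre_minMoves target maxDoubles) := by unfold Pre_minMoves; infer_instance
def pvWitness_minMoves : Int × Int := (19, 2)

def Spec_minMoves (target : Int) (maxDoubles : Int) (out : Int) : Prop := out = minMoves_alt target maxDoubles
instance (target : Int) (maxDoubles : Int) (out : Int) : Decidable (Spec_minMoves target maxDoubles out) := by unfold Spec_minMoves; infer_instance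

-- ===== CLAIM (what is proved, stated in full; the proofs are below) =====
def Claim_equal_minMoves : Prop := ∀ (target : Int) (maxDoubles : Int), Dom_minMoves target maxDoubles → Pre_minMoves target maxDoubles → Spec_minMoves target maxDoubles (minMoves target maxDoubles)

-- ===== LEMMAS AND PROOFS =====

-- closed form of B's non-trivial branch, with the bit operations rewritten to mod/div on Nat
def cfN (n : Nat) (m : Int) : Int :=
  let k : Int := min m ((PySem.Int.bitLength (n : Int) : Int) - 1)
  k + (PySem.Int.bitCount ((n % 2 ^ k.toNat : Nat) : Int) : Int) + ((n / 2 ^ k.toNat : Nat) : Int) - 1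

lemma shl_sub_one (k : Nat) : ((1 <<< k : Int)) - 1 = ((2^k - 1 : Nat) : Int) := by
  have h1 : ((1 <<< k : Int)) = ((2^k : Nat) : Int) := by
    simp [Int.shiftLeft_eq]
  have h2 : 1 ≤ 2^k := Nat.one_le_two_pow
  rw [h1]
  omega

lemma alt_eq_cfN (n : Nat) (m : Int) (hn : 2 ≤ n) :
    minMoves_alt (n : Int) m = cfN n m := by
  unfold minMoves_alt cfN
  rw [if_neg (by exact_mod_cast (by omega : ¬ (n:Int) ≤ 1))]
  have hband : PySem.Int.band (n : Int) ((1 <<< (min m ((PySem.Int.bitLength (n : Int) : Int) - 1)).toNat) - 1)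
      = ((n % 2 ^ (min m ((PySem.Int.bitLength (n : Int) : Int) - 1)).toNat : Nat) : Int) := by
    rw [shl_sub_one, PySem.Int.band_natCast, Nat.and_two_pow_sub_one_eq_mod]
  have hshr : ((n : Int) >>> (min m ((PySem.Int.bitLength (n : Int) : Int) - 1)).toNat)
      = ((n / 2 ^ (min m ((PySem.Int.bitLength (n : Int) : Int) - 1)).toNat : Nat) : Int) := by
    rw [show ((n:Int) >>> (min m ((PySem.Int.bitLength (n : Int) : Int) - 1)).toNat) = ((n >>> (min m ((PySem.Int.bitLength (n : Int) : Int) - 1)).toNat : Nat) : Int) from by exact_mod_cast rfl, Nat.shiftRight_eq_div_pow]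
  simp only [hband, hshr]

lemma mod_two_mul_even (a b : Nat) : (2*a) % (2*b) = 2*(a%b) := Nat.mul_mod_mul_left 2 a b

lemma div_two_mul_even (a b : Nat) : (2*a) / (2*b) = a / b := Nat.mul_div_mul_left a b (by omega)

lemma mod_two_mul_odd (a b : Nat) (hb : 0 < b) : (2*a+1) % (2*b) = 2*(a%b)+1 := by
  have key : 2*a+1 = (2*(a%b)+1) + (2*b)*(a/b) := by
    conv_lhs => rw [← Nat.div_add_mod a b]
    ring
  rw [key, Nat.add_mul_mod_self_left]
  exact Nat.mod_eq_of_lt (by have := Nat.mod_lt a hb; omega)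

lemma div_two_mul_odd (a b : Nat) (hb : 0 < b) : (2*a+1) / (2*b) = a / b := by
  have key : 2*a+1 = (2*(a%b)+1) + (2*b)*(a/b) := by
    conv_lhs => rw [← Nat.div_add_mod a b]
    ring
  rw [key, Nat.add_mul_div_left _ _ (by omega : 0 < 2*b)]
  rw [Nat.div_eq_of_lt (by have := Nat.mod_lt a hb; omega)]
  omega

lemma bitCount_two_mul (x : Nat) : PySem.Int.bitCount ((2*x : Nat) : Int) = PySem.Int.bitCount ((x : Nat) : Int) := by
  rcases Nat.eq_zero_or_pos x with h | h
  · simp [h]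
  · rw [PySem.Int.bitCount_natCast (m := 2*x) (by omega)]
    simp [Nat.mul_mod_right, Nat.mul_div_cancel_left _ (by omega : 0 < 2)]

lemma bitCount_two_mul_add_one (x : Nat) : PySem.Int.bitCount ((2*x+1 : Nat) : Int) = PySem.Int.bitCount ((x : Nat) : Int) + 1 := by
  rw [PySem.Int.bitCount_natCast (m := 2*x+1) (by omega)]
  have h1 : (2*x+1) % 2 = 1 := by omega
  have h2 : (2*x+1) / 2 = x := by omega
  rw [h1, h2]; omega

lemma bitLength_pos (n : Nat) (hn : 2 ≤ n) : 2 ≤ PySem.Int.bitLength (n : Int) := by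
  have h := PySem.Int.lt_two_pow_bitLength (n : Int)
  rw [Int.natAbs_natCast] at h
  by_contra hc
  have : PySem.Int.bitLength (n : Int) ≤ 1 := by omega
  have := Nat.pow_le_pow_right (by omega : 1 ≤ 2) this
  omega

lemma alt_one (m : Int) : minMoves_alt 1 m = 0 := by
  norm_num [minMoves_alt]

lemma cfN_zero (n : Nat) (hn : 2 ≤ n) : cfN n 0 = (n : Int) - 1 := by
  have hbl := bitLength_pos n hn
  simp only [cfN]
  have hk : min (0:Int) ((PySem.Int.bitLength (n : Int) : Int) - 1) = 0 := by omega
  rw [hk]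
  norm_num

lemma cfN_even (n : Nat) (m : Int) (hn : 2 ≤ n) (he : n % 2 = 0) (hm : 1 ≤ m) :
    cfN n m = 1 + minMoves_alt ((n / 2 : Nat) : Int) (m - 1) := by
  by_cases h2 : n / 2 = 1
  · have hn2 : n = 2 := by omega
    subst hn2
    rw [h2, Nat.cast_one, alt_one]
    simp only [cfN]
    have hb : PySem.Int.bitLength ((2:Nat) : Int) = 2 := by decide
    rw [hb]
    have hmin : min m (((2:Nat):Int) - 1) = 1 := by push_cast; omega
    rw [hmin]
    norm_num
  · have hge : 2 ≤ n / 2 := by omega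
    rw [alt_eq_cfN _ _ hge]
    simp only [cfN]
    have h0 : 0 < n := by omega
    have hB : PySem.Int.bitLength (n : Int) = PySem.Int.bitLength ((n/2 : Nat) : Int) + 1 :=
      PySem.Int.bitLength_natCast h0
    have hB' := bitLength_pos (n/2) hge
    set B' : Nat := PySem.Int.bitLength ((n/2 : Nat) : Int) with hB'def
    rw [hB]
    have hk : (min m ((((B' + 1 : Nat)) : Int) - 1)).toNat = (min (m-1) ((B' : Int) - 1)).toNat + 1 := by
      push_cast; omega
    have hkv : min m ((((B' + 1 : Nat)) : Int) - 1) = min (m-1) ((B' : Int) - 1) + 1 := by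
      push_cast; omega
    rw [hk, hkv]
    set j : Nat := (min (m-1) ((B' : Int) - 1)).toNat with hjdef
    have hpow : 2 ^ (j + 1) = 2 * 2 ^ j := by ring
    have hnn : n = 2 * (n / 2) := by omega
    rw [hpow]
    conv_lhs => rw [hnn]
    rw [mod_two_mul_even, div_two_mul_even, bitCount_two_mul]
    push_cast
    ring

lemma cfN_odd (n : Nat) (m : Int) (hn : 3 ≤ n) (ho : n % 2 = 1) (hm : 1 ≤ m) :
    cfN n m = 1 + cfN (n - 1) m := by
  simp only [cfN]
  have h0 : 0 < n := by omega
  have hB : PySem.Int.bitLength (n : Int) = PySem.Int.bitLength ((n/2 : Nat) : Int) + 1 :=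
    PySem.Int.bitLength_natCast h0
  have hB1 : PySem.Int.bitLength ((n - 1 : Nat) : Int) = PySem.Int.bitLength (((n-1)/2 : Nat) : Int) + 1 :=
    PySem.Int.bitLength_natCast (by omega)
  have hhalf : (n - 1) / 2 = n / 2 := by omega
  rw [hhalf] at hB1
  have hBB : PySem.Int.bitLength ((n - 1 : Nat) : Int) = PySem.Int.bitLength (n : Int) := by
    rw [hB, hB1]
  rw [hBB]
  have hbl := bitLength_pos n (by omega)
  set B : Nat := PySem.Int.bitLength (n : Int) with hBdef
  have hk1 : 1 ≤ min m ((B : Int) - 1) := by omega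
  set k : Int := min m ((B : Int) - 1) with hkdef
  have hj : k.toNat = (k.toNat - 1) + 1 := by omega
  set j : Nat := k.toNat - 1 with hjdef
  rw [hj]
  have hpow : 2 ^ (j + 1) = 2 * 2 ^ j := by ring
  rw [hpow]
  have hb : (0:Nat) < 2 ^ j := Nat.pow_pos (by omega)
  have hnn : n = 2 * (n / 2) + 1 := by omega
  have hn1 : n - 1 = 2 * (n / 2) := by omega
  conv_lhs => rw [hnn]
  conv_rhs => rw [hn1]
  rw [mod_two_mul_odd _ _ hb, div_two_mul_odd _ _ hb, mod_two_mul_even, div_two_mul_even,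
    bitCount_two_mul, bitCount_two_mul_add_one]
  push_cast
  ring

lemma loop_eq (n : Nat) : ∀ (m moves : Int), 1 ≤ n → 0 ≤ m →
    minMovesLoop (n : Int) m moves = moves + minMoves_alt (n : Int) m := by
  induction n using Nat.strong_induction_on with
  | _ n ih =>
    intro m moves h1 hm
    by_cases hn1 : n = 1
    · subst hn1
      rw [minMovesLoop, if_neg (by norm_num), Nat.cast_one, alt_one]
      ring
    · have hn : 2 ≤ n := by omega
      by_cases hm0 : m = 0
      · subst hm0
        rw [minMovesLoop, if_neg (by simp), alt_eq_cfN _ _ hn, cfN_zero _ hn]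
        ring
      · have hm1 : 1 ≤ m := by omega
        rw [minMovesLoop, if_pos ⟨by exact_mod_cast (by omega : (1:Int) < (n:Int)), hm0⟩]
        by_cases hev : n % 2 = 0
        · have hmod : PySem.Int.mod ((n : Int)) 2 = 0 := by
            rw [PySem.Int.mod_eq_emod_of_pos (by norm_num)]
            omega
          have hfd : PySem.Int.floordiv ((n : Int)) 2 = ((n / 2 : Nat) : Int) := by
            rw [PySem.Int.floordiv_eq_ediv_of_pos (by norm_num)]
            omega
          rw [if_pos hmod, hfd, ih (n/2) (by omega) (m-1) (moves+1) (by omega) (by omega),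
            alt_eq_cfN n m hn, cfN_even n m hn hev hm1]
          ring
        · have hmod : ¬ PySem.Int.mod ((n : Int)) 2 = 0 := by
            rw [PySem.Int.mod_eq_emod_of_pos (by norm_num)]
            omega
          have hsub : ((n : Int)) - 1 = ((n - 1 : Nat) : Int) := by omega
          rw [if_neg hmod, hsub, ih (n-1) (by omega) m (moves+1) (by omega) hm,
            alt_eq_cfN n m hn, alt_eq_cfN (n-1) m (by omega), cfN_odd n m (by omega) (by omega) hm1]
          ring

-- ===== VERDICT (by name: the statement is the Claim_ definition above) =====
theorem minMoves_spec : Claim_equal_minMoves := by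
  intro target maxDoubles _ hpre
  unfold Spec_minMoves minMoves
  by_cases ht : target ≤ 1
  · rw [minMovesLoop, if_neg (by omega)]
    unfold minMoves_alt
    rw [if_pos ht]; ring
  · have hm : 0 ≤ maxDoubles := by
      rcases hpre with h | h
      · exact h
      · omega
    have h1 : target = ((target.toNat : Nat) : Int) := by omega
    rw [h1, loop_eq target.toNat maxDoubles 0 (by omega) hm]
    ring
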